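-- pv_equiv track=rewrite | github.com/python-mode/python-mode | pylibs/autopep8.py | is_probably_inside_string_or_comment
-- ===== SOURCE A (Python) =====
-- def is_probably_inside_string_or_comment(line, index):
--     """Return True if index may be inside a string or comment."""
--     # Make sure we are not in a string.
--     for quote in ['"', "'"]:
--         if quote in line:
--             if line.find(quote) <= index:
--                 return True
--
--     # Make sure we are not in a comment.
--     if '#' in line:
--         if line.find('#') <= index:
--             return True
--
--     return False
-- ===== SOURCE B (Python) =====
-- def is_probably_inside_string_or_comment(line, index):
--     """Return True if index may be inside a string or comment."""
--     for i, ch in enumerate(line):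
--         if i > index:
--             break
--         if ch in '"\'#':
--             return True
--     return False
-- ===== Notes on version B (the rewrite author's own statement) =====
-- stated objective: simpler
-- what changed: Replaces three separate substring scans (`in` plus `find` per marker) by one left-to-right positional pass over the line that stops at `index` and returns True on the first quote or hash seen.
import Mathlib
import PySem

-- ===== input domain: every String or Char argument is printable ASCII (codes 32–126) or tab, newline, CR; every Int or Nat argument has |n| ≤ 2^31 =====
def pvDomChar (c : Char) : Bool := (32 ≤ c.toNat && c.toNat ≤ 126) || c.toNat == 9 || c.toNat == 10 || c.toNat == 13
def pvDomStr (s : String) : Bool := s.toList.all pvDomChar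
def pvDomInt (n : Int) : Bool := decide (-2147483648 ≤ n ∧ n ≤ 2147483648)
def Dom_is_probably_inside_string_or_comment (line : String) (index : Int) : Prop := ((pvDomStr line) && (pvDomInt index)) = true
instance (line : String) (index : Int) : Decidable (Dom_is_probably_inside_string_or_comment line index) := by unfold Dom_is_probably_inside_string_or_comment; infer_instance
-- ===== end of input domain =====

-- B replaces A's three separate substring scans by one bounded left-to-right positional pass (simpler, single traversal).


-- ===== PORT A =====
-- loop body: "if quote in line: if line.find(quote) <= index: return True"
def pvCheck (line : String) (index : Int) (quote : String) : Bool :=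
  if PySem.Str.isIn quote line then decide (PySem.Str.find line quote ≤ index) else false

def is_probably_inside_string_or_comment (line : String) (index : Int) : Bool :=
  -- for quote in ['"', "'"]: … return True  (early exit = any)
  if ["\"", "'"].any (fun quote => pvCheck line index quote) then true
  -- if '#' in line: if line.find('#') <= index: return True; return False
  else pvCheck line index "#"

-- ===== PORT B =====
-- for i, ch in enumerate(line): if i > index: break; if ch in '"\'#': return True -- else: return False
def pvScan (index : Int) : List Char → Nat → Bool
  | [], _ => false
  | c :: rest, i =>
    if (i : Int) > index then false
    else if PySem.Chars.isIn [c] ['"', '\'', '#'] then true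
    else pvScan index rest (i + 1)

def is_probably_inside_string_or_comment_alt (line : String) (index : Int) : Bool :=
  pvScan index line.toList 0

-- ===== PRECONDITION & SPEC =====
def Spec_is_probably_inside_string_or_comment (line : String) (index : Int) (out : Bool) : Prop := out = is_probably_inside_string_or_comment_alt line index
instance (line : String) (index : Int) (out : Bool) : Decidable (Spec_is_probably_inside_string_or_comment line index out) := by unfold Spec_is_probably_inside_string_or_comment; infer_instance

-- ===== CLAIM (what is proved, stated in full; the proofs are below) =====
def Claim_equal_is_probably_inside_string_or_comment : Prop := ∀ (line : String) (index : Int), Dom_is_probably_inside_string_or_comment line index → Spec_is_probably_inside_string_or_comment line index (is_probably_inside_string_or_comment line index)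

-- ===== LEMMAS AND PROOFS =====

-- [c] is an infix of l iff c is a member of l
theorem pv_singleton_infix {c : Char} {l : List Char} : [c] <:+: l ↔ c ∈ l := by
  constructor
  · intro h; exact List.singleton_sublist.mp h.sublist
  · intro h
    obtain ⟨s, t, rfl⟩ := List.append_of_mem h
    exact ⟨s, t, by simp⟩

-- single-char 'in' is membership
theorem pv_isIn_singleton {c : Char} {l : List Char} :
    PySem.Chars.isIn [c] l = true ↔ c ∈ l := by
  rw [PySem.Chars.isIn_iff_infix]; exact pv_singleton_infix

-- [c] <+: l.drop j ↔ l[j]? = some c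
theorem pv_prefix_drop {c : Char} {l : List Char} {j : Nat} :
    [c] <+: l.drop j ↔ l[j]? = some c := by
  rw [← List.head?_drop]
  cases hd : l.drop j with
  | nil => simp
  | cons a t =>
    constructor
    · rintro ⟨u, hu⟩
      cases hu; rfl
    · intro h
      simp at h
      exact ⟨t, by simp [h]⟩

-- A's per-character test holds iff c occurs at some position ≤ index
theorem pv_charA {c : Char} {l : List Char} {index : Int} :
    (PySem.Chars.isIn [c] l = true ∧ PySem.Chars.find l [c] ≤ index) ↔
      (∃ j : Nat, (j : Int) ≤ index ∧ l[j]? = some c) := by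
  constructor
  · rintro ⟨hin, hle⟩
    have hnn : 0 ≤ PySem.Chars.find l [c] :=
      (PySem.Chars.find_nonneg_iff l [c]).mpr ((PySem.Chars.isIn_iff_infix [c] l).mp hin)
    obtain ⟨hpre, _⟩ := PySem.Chars.find_spec (s := l) (sub := [c]) hnn
    refine ⟨(PySem.Chars.find l [c]).toNat, ?_, pv_prefix_drop.mp hpre⟩
    omega
  · rintro ⟨j, hj, hget⟩
    have hpre : [c] <+: l.drop j := pv_prefix_drop.mpr hget
    have hinf : [c] <:+: l := (hpre.isInfix).trans ((List.drop_suffix j l).isInfix)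
    have hin : PySem.Chars.isIn [c] l = true := (PySem.Chars.isIn_iff_infix [c] l).mpr hinf
    refine ⟨hin, ?_⟩
    have hnn : 0 ≤ PySem.Chars.find l [c] := (PySem.Chars.find_nonneg_iff l [c]).mpr hinf
    obtain ⟨_, hmin⟩ := PySem.Chars.find_spec (s := l) (sub := [c]) hnn
    by_contra hlt
    have : j < (PySem.Chars.find l [c]).toNat := by omega
    exact hmin j this hpre

-- A's quote test as an existential, for a single-character quote string
theorem pv_check_iff {q : String} {c : Char} (hq : q.toList = [c]) (line : String) (index : Int) :
    pvCheck line index q = true ↔ ∃ j : Nat, (j : Int) ≤ index ∧ line.toList[j]? = some c := by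
  unfold pvCheck
  have hA := pv_charA (c := c) (l := line.toList) (index := index)
  simp only [PySem.Str.isIn_eq, PySem.Str.find_eq, hq]
  split_ifs with h
  · rw [decide_eq_true_iff]
    constructor
    · intro hle
      exact hA.mp ⟨h, hle⟩
    · intro hex
      exact (hA.mpr hex).2
  · simp only [false_iff]
    intro hex
    exact h (hA.mpr hex).1

-- B's scan holds iff some marker occurs at offset j with k + j ≤ index
theorem pv_scan_iff (index : Int) (l : List Char) (k : Nat) :
    pvScan index l k = true ↔
      ∃ j : Nat, ((k + j : Nat) : Int) ≤ index ∧
        (l[j]? = some '"' ∨ l[j]? = some '\'' ∨ l[j]? = some '#') := by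
  induction l generalizing k with
  | nil => simp [pvScan]
  | cons c rest ih =>
    simp only [pvScan]
    split_ifs with hbound hmem
    · simp only [false_iff]
      rintro ⟨j, hj, _⟩
      omega
    · simp only [true_iff]
      have := pv_isIn_singleton.mp hmem
      refine ⟨0, by omega, ?_⟩
      simp at this ⊢
      tauto
    · rw [ih (k + 1)]
      constructor
      · rintro ⟨j, hj, hc⟩
        exact ⟨j + 1, by push_cast at hj ⊢; omega, by simpa using hc⟩
      · rintro ⟨j, hj, hc⟩
        cases j with
        | zero =>
          exfalso
          apply hmem
          apply pv_isIn_singleton.mpr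
          simp at hc
          rcases hc with h | h | h <;> simp [h]
        | succ j =>
          exact ⟨j, by push_cast at hj ⊢; omega, by simpa using hc⟩

-- ===== VERDICT (by name: the statement is the Claim_ definition above) =====
theorem is_probably_inside_string_or_comment_spec : Claim_equal_is_probably_inside_string_or_comment := by
  intro line index _
  show _ = _
  have t1 := pv_check_iff (q := "\"") (c := '"') rfl line index
  have t2 := pv_check_iff (q := "'") (c := '\'') rfl line index
  have t3 := pv_check_iff (q := "#") (c := '#') rfl line index
  have hscan := pv_scan_iff index line.toList 0
  simp only [Nat.zero_add] at hscan
  rw [Bool.eq_iff_iff]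
  unfold is_probably_inside_string_or_comment is_probably_inside_string_or_comment_alt
  rw [hscan]
  simp only [List.any_cons, List.any_nil, Bool.or_false]
  constructor
  · intro h
    by_cases h1 : (pvCheck line index "\"" || pvCheck line index "'") = true
    · rcases Bool.or_eq_true_iff.mp h1 with hc | hc
      · obtain ⟨j, hj, hg⟩ := t1.mp hc
        exact ⟨j, hj, Or.inl hg⟩
      · obtain ⟨j, hj, hg⟩ := t2.mp hc
        exact ⟨j, hj, Or.inr (Or.inl hg)⟩
    · rw [if_neg h1] at h
      obtain ⟨j, hj, hg⟩ := t3.mp h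
      exact ⟨j, hj, Or.inr (Or.inr hg)⟩
  · rintro ⟨j, hj, hg | hg | hg⟩
    · have := t1.mpr ⟨j, hj, hg⟩
      simp [this]
    · have := t2.mpr ⟨j, hj, hg⟩
      simp [this]
    · have := t3.mpr ⟨j, hj, hg⟩
      by_cases h1 : (pvCheck line index "\"" || pvCheck line index "'") = true
      · simp [h1]
      · rw [if_neg h1]
        exact this
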